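-- pv_equiv track=rewrite | github.com/flp-gregorio/CMAC03 | getData/calculos.py | multigrafo
-- ===== SOURCE A (Python) =====
-- def multigrafo(listaAdj):
--     # Verifica se o grafo é um multigrafo, verificando se existem
--     # duas arestas com o mesmo par de vértices
--     arestas = set()
--     for vertice, vizinhos in listaAdj.items():
--         for vizinho in vizinhos:
--             if (vertice, vizinho) in arestas or (vizinho, vertice) in arestas:
--                 return True
--             else:
--                 arestas.add((vertice, vizinho))
--     return False
-- ===== SOURCE B (Python) =====
-- def multigrafo(listaAdj):
--     # Materialize every edge as an order-normalized pair, then brute-force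
--     # compare every pair of positions; no auxiliary set/dict at all.
--     arestas = [(v, w) if v <= w else (w, v)
--                for v, vizinhos in listaAdj.items() for w in vizinhos]
--     return any(arestas[i] == arestas[j]
--                for j in range(len(arestas)) for i in range(j))
-- ===== Notes on version B (the rewrite author's own statement) =====
-- stated objective: alternative
-- what changed: Drops A's incremental seen-set with early return entirely: B materializes all order-normalized edge pairs and detects a repeat by brute-force comparison of every pair of positions, using no set or hash structure (trades O(E) for O(E^2) in exchange for set-free code).
import Mathlib
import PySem

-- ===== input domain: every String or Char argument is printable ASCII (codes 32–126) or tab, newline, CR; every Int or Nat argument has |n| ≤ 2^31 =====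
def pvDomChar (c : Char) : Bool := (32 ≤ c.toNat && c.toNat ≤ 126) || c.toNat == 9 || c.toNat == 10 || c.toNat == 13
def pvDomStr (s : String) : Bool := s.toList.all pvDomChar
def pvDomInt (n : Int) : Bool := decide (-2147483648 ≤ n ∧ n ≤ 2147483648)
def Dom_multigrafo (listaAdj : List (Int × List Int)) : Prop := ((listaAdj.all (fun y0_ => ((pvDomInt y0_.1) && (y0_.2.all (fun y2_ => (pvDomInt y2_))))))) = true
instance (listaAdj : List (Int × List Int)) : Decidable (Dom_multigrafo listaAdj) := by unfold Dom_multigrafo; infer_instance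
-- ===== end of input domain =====

-- B drops A's incremental seen-set with early return: it materializes all order-normalized
-- edge pairs and detects a repeat by brute-force comparison of every pair of positions,
-- with no set structure (objective: alternative; O(E^2) instead of O(E)).

-- ===== PORT A =====
-- inner 'for vizinho in vizinhos' loop; 'none' encodes the early 'return True'
def multigrafoInner (vertice : Int) : List Int → PySem.Set (Int × Int) → Option (PySem.Set (Int × Int))
  | [], arestas => some arestas
  | vizinho :: rest, arestas =>
      if PySem.Set.contains arestas (vertice, vizinho) || PySem.Set.contains arestas (vizinho, vertice) then
        none
      else
        multigrafoInner vertice rest (PySem.Set.add arestas (vertice, vizinho))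

-- outer 'for vertice, vizinhos in listaAdj.items()' loop
def multigrafoOuter : List (Int × List Int) → PySem.Set (Int × Int) → Bool
  | [], _ => false
  | (vertice, vizinhos) :: rest, arestas =>
      match multigrafoInner vertice vizinhos arestas with
      | none => true
      | some arestas' => multigrafoOuter rest arestas'

def multigrafo (listaAdj : List (Int × List Int)) : Bool :=
  multigrafoOuter listaAdj PySem.Set.empty

-- ===== PORT B =====
-- '(v, w) if v <= w else (w, v)'
def normEdge (v w : Int) : Int × Int := if v ≤ w then (v, w) else (w, v)

-- the comprehension, then 'any(arestas[i] == arestas[j] for j in range(len(arestas)) for i in range(j))'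
def multigrafo_alt (listaAdj : List (Int × List Int)) : Bool :=
  let arestas := listaAdj.flatMap (fun p => p.2.map (fun w => normEdge p.1 w))
  (PySem.List.pyRange 0 arestas.length 1).any (fun j =>
    (PySem.List.pyRange 0 j 1).any (fun i =>
      PySem.List.pyGetD arestas i (0, 0) == PySem.List.pyGetD arestas j (0, 0)))

-- ===== PRECONDITION & SPEC =====
def Spec_multigrafo (listaAdj : List (Int × List Int)) (out : Bool) : Prop := out = multigrafo_alt listaAdj
instance (listaAdj : List (Int × List Int)) (out : Bool) : Decidable (Spec_multigrafo listaAdj out) := by unfold Spec_multigrafo; infer_instance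

-- ===== CLAIM (what is proved, stated in full; the proofs are below) =====
def Claim_equal_multigrafo : Prop := ∀ (listaAdj : List (Int × List Int)), Dom_multigrafo listaAdj → Spec_multigrafo listaAdj (multigrafo listaAdj)

-- ===== LEMMAS AND PROOFS =====

def normP (p : Int × Int) : Int × Int := normEdge p.1 p.2

def normKeys (l : List (Int × List Int)) : List (Int × Int) :=
  l.flatMap (fun p => p.2.map (fun w => normEdge p.1 w))

lemma normEdge_inj (a b v w : Int) (h : normEdge a b = normEdge v w) :
    (a = v ∧ b = w) ∨ (a = w ∧ b = v) := by
  unfold normEdge at h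
  split_ifs at h <;> simp [Prod.ext_iff] at h <;> omega

lemma normEdge_comm (v w : Int) : normEdge w v = normEdge v w := by
  unfold normEdge; split_ifs <;> first | rfl | (simp [Prod.ext_iff]; omega)

lemma mem_map_norm (S : List (Int × Int)) (v w : Int) :
    ((v, w) ∈ S ∨ (w, v) ∈ S) ↔ normEdge v w ∈ S.map normP := by
  constructor
  · rintro (h | h)
    · exact List.mem_map.2 ⟨(v, w), h, rfl⟩
    · exact List.mem_map.2 ⟨(w, v), h, normEdge_comm v w⟩
  · intro h
    rcases List.mem_map.1 h with ⟨⟨a, b⟩, hq, he⟩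
    rcases normEdge_inj a b v w he with ⟨h1, h2⟩ | ⟨h1, h2⟩
    · left; rwa [← h1, ← h2]
    · right; rwa [← h2, ← h1]

lemma inner_spec (v : Int) : ∀ (ns : List Int) (S : PySem.Set (Int × Int)),
    (S.map normP).Nodup →
    (multigrafoInner v ns S = none ∧
       ¬ (S.map normP ++ ns.map (fun w => normEdge v w)).Nodup) ∨
    (∃ S', multigrafoInner v ns S = some S' ∧
       S'.map normP = S.map normP ++ ns.map (fun w => normEdge v w) ∧
       (S'.map normP).Nodup) := by
  intro ns
  induction ns with
  | nil => intro S hS; right; exact ⟨S, rfl, by simp, hS⟩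
  | cons w ws ih =>
    intro S hS
    by_cases hmem : (v, w) ∈ S ∨ (w, v) ∈ S
    · left
      constructor
      · have hcond : (PySem.Set.contains S (v, w) || PySem.Set.contains S (w, v)) = true := by
          simp; exact hmem
        simp only [multigrafoInner]
        rw [if_pos hcond]
      · intro hnd
        rcases List.nodup_append.1 hnd with ⟨_, _, hdisj⟩
        exact hdisj _ ((mem_map_norm S v w).1 hmem) _ (by simp) rfl
    · rw [not_or] at hmem
      obtain ⟨h1, h2⟩ := hmem
      have hcond : ¬ ((PySem.Set.contains S (v, w) || PySem.Set.contains S (w, v)) = true) := by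
        simp; exact ⟨h1, h2⟩
      have hstep : multigrafoInner v (w :: ws) S
          = multigrafoInner v ws (PySem.Set.add S (v, w)) := by
        simp only [multigrafoInner]
        rw [if_neg hcond]
      have hadd : PySem.Set.add S (v, w) = S ++ [(v, w)] :=
        PySem.Set.add_of_not_mem h1
      have hnotin : normEdge v w ∉ S.map normP := by
        intro h; exact absurd ((mem_map_norm S v w).2 h) (by tauto)
      have hmap : (PySem.Set.add S (v, w)).map normP = S.map normP ++ [normEdge v w] := by
        simp [hadd, normP]
      have hnd' : ((PySem.Set.add S (v, w)).map normP).Nodup := by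
        rw [hmap]
        exact List.Nodup.append hS (List.nodup_singleton _)
          (by intro x hx hx'; simp at hx'; subst hx'; exact hnotin hx)
      have hlist : (PySem.Set.add S (v, w)).map normP ++ ws.map (fun w => normEdge v w)
          = S.map normP ++ (w :: ws).map (fun w => normEdge v w) := by
        rw [hmap]; simp
      rcases ih (PySem.Set.add S (v, w)) hnd' with ⟨he, hn⟩ | ⟨S', he, hmap', hnd''⟩
      · left; rw [hstep]; exact ⟨he, by rwa [hlist] at hn⟩
      · right; exact ⟨S', by rw [hstep]; exact he, by rw [hmap', hlist], hnd''⟩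

lemma outer_spec : ∀ (l : List (Int × List Int)) (S : PySem.Set (Int × Int)),
    (S.map normP).Nodup →
    multigrafoOuter l S = !decide ((S.map normP ++ normKeys l).Nodup) := by
  intro l
  induction l with
  | nil =>
    intro S hS
    simp [multigrafoOuter, normKeys, hS]
  | cons p rest ih =>
    intro S hS
    obtain ⟨v, ns⟩ := p
    have hk : normKeys ((v, ns) :: rest) = ns.map (fun w => normEdge v w) ++ normKeys rest := by
      simp [normKeys]
    rcases inner_spec v ns S hS with ⟨he, hn⟩ | ⟨S', he, hmap', hnd'⟩
    · have hwhole : ¬ (S.map normP ++ normKeys ((v, ns) :: rest)).Nodup := by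
        intro hnd
        apply hn
        have hsub : (S.map normP ++ ns.map (fun w => normEdge v w)).Sublist
            (S.map normP ++ normKeys ((v, ns) :: rest)) := by
          rw [hk, ← List.append_assoc]
          exact List.sublist_append_left _ _
        exact hnd.sublist hsub
      simp [multigrafoOuter, he, hwhole]
    · have := ih S' hnd'
      simp only [multigrafoOuter, he]
      rw [this, hmap', hk, List.append_assoc]

-- B's nested index scan finds a duplicate position iff the list is not Nodup
lemma alt_scan_iff (a : List (Int × Int)) :
    ((PySem.List.pyRange 0 a.length 1).any (fun j =>
      (PySem.List.pyRange 0 j 1).any (fun i =>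
        PySem.List.pyGetD a i (0, 0) == PySem.List.pyGetD a j (0, 0))) = true) ↔ ¬ a.Nodup := by
  rw [List.any_eq_true]
  constructor
  · rintro ⟨j, hj, hinner⟩
    rw [List.any_eq_true] at hinner
    obtain ⟨i, hi, heq⟩ := hinner
    rw [PySem.List.mem_pyRange_one] at hj hi
    have hj' : j.toNat < a.length := by omega
    have hi' : i.toNat < j.toNat := by omega
    have heq' : a[i.toNat] = a[j.toNat] := by
      rw [PySem.List.pyGetD_eq_getElem a (i := i) (0, 0) (by omega) (by omega),
          PySem.List.pyGetD_eq_getElem a (i := j) (0, 0) (by omega) (by omega)] at heq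
      exact eq_of_beq heq
    intro hnd
    exact (List.pairwise_iff_getElem.1 hnd i.toNat j.toNat (by omega) hj' hi') heq'
  · intro hnd
    rw [List.Nodup, List.pairwise_iff_getElem] at hnd
    push Not at hnd
    obtain ⟨i, j, hi, hj, hij, heq⟩ := hnd
    refine ⟨(j : Int), PySem.List.mem_pyRange_one.2 ⟨by omega, by omega⟩, ?_⟩
    rw [List.any_eq_true]
    refine ⟨(i : Int), PySem.List.mem_pyRange_one.2 ⟨by omega, by omega⟩, ?_⟩
    rw [PySem.List.pyGetD_eq_getElem a (i := (i : Int)) (0, 0) (by omega) (by omega),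
        PySem.List.pyGetD_eq_getElem a (i := (j : Int)) (0, 0) (by omega) (by omega)]
    simpa using heq

-- ===== VERDICT (by name: the statement is the Claim_ definition above) =====
theorem multigrafo_spec : Claim_equal_multigrafo := by
  intro l _
  unfold Spec_multigrafo multigrafo multigrafo_alt
  have h0 : ((PySem.Set.empty : PySem.Set (Int × Int)).map normP).Nodup := by
    simp [PySem.Set.empty]
  rw [outer_spec l PySem.Set.empty h0]
  have hk : (PySem.Set.empty : PySem.Set (Int × Int)).map normP ++ normKeys l = normKeys l := by
    simp [PySem.Set.empty]
  rw [hk]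
  have harestas : l.flatMap (fun p => p.2.map (fun w => normEdge p.1 w)) = normKeys l := rfl
  simp only [harestas]
  by_cases hnd : (normKeys l).Nodup
  · have hb : ¬ ((PySem.List.pyRange 0 (normKeys l).length 1).any (fun j =>
        (PySem.List.pyRange 0 j 1).any (fun i =>
          PySem.List.pyGetD (normKeys l) i (0, 0) == PySem.List.pyGetD (normKeys l) j (0, 0))) = true) := by
      rw [alt_scan_iff]; exact not_not_intro hnd
    simp only [Bool.not_eq_true] at hb
    simp [hnd, hb]
  · have hb := (alt_scan_iff (normKeys l)).2 hnd
    simp [hnd, hb]
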